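-- pv_equiv track=rewrite | github.com/mfandre/Codility | MinAvgTwoSlice.py | find_3_lowers
-- ===== SOURCE A (Python) =====
-- def find_3_lowers(A):
--     total = 10001 + 10001 + 10001
--     x_pos = 0
--     y_pos = 0
--     z_pos = 0
--     for i,j,k in zip(range(len(A)), range(1, len(A)),range(2, len(A))):
--         if k == len(A):
--             return x_pos, y_pos, z_pos, total
--         if A[i] + A[j] + A[k] == total:
--             continue #ignoring the more deeply index
--         elif A[i] + A[j] + A[k] < total:
--             total = A[i] + A[j] + A[k]
--             x_pos = i
--             y_pos = j
--             z_pos = k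
--
--     return x_pos, y_pos, z_pos, total
-- ===== SOURCE B (Python) =====
-- def find_3_lowers(A):
--     P = [0]
--     for a in A:
--         P.append(P[-1] + a)
--     best = 30003
--     x = y = z = 0
--     for i in range(len(A) - 2):
--         s = P[i + 3] - P[i]
--         if s < best:
--             best = s
--             x, y, z = i, i + 1, i + 2
--     return x, y, z, best
-- ===== Notes on version B (the rewrite author's own statement) =====
-- stated objective: alternative
-- what changed: B builds a prefix-sum table in one pass and derives each 3-window sum as P[i+3]-P[i], tracking the strict minimum over start indices, instead of A's triple-zip of ranges with per-step re-addition of three elements and its dead early-return branch.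
import Mathlib
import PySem

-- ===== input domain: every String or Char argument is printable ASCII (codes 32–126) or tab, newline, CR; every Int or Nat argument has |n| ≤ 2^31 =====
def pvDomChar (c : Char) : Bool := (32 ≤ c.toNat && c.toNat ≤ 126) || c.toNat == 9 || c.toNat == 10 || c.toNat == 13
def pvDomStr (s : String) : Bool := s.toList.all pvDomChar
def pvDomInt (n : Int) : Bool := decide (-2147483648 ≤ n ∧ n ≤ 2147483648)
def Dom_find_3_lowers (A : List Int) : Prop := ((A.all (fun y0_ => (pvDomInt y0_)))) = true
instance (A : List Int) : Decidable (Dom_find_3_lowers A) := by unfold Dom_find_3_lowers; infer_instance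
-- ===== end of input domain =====

-- B replaces A's triple-zip of ranges (re-adding three elements each step) by a one-pass
-- prefix-sum table with window sums taken by subtraction; objective: alternative (same O(n) cost).

-- ===== PORT A =====
-- loop over the zipped triples; the 'k == len(A)' early return is transliterated as-is
-- (indices i, j, k are always in range on any input, so the pyGetD default 0 is never read)
def pvALoop (A : List Int) : List (Int × Int × Int) → Int × Int × Int × Int → Int × Int × Int × Int
  | [], st => st
  | (i, j, k) :: rest, (x_pos, y_pos, z_pos, total) =>
    if k = (A.length : Int) then (x_pos, y_pos, z_pos, total)
    else if PySem.List.pyGetD A i 0 + PySem.List.pyGetD A j 0 + PySem.List.pyGetD A k 0 = total then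
      pvALoop A rest (x_pos, y_pos, z_pos, total)
    else if PySem.List.pyGetD A i 0 + PySem.List.pyGetD A j 0 + PySem.List.pyGetD A k 0 < total then
      pvALoop A rest (i, j, k, PySem.List.pyGetD A i 0 + PySem.List.pyGetD A j 0 + PySem.List.pyGetD A k 0)
    else
      pvALoop A rest (x_pos, y_pos, z_pos, total)

def find_3_lowers (A : List Int) : Int × Int × Int × Int :=
  let n : Int := (A.length : Int)
  let triples := ((PySem.List.pyRange 0 n 1).zip ((PySem.List.pyRange 1 n 1).zip (PySem.List.pyRange 2 n 1))).map
    (fun p => (p.1, p.2.1, p.2.2))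
  pvALoop A triples (0, 0, 0, 10001 + 10001 + 10001)

-- ===== PORT B =====
def find_3_lowers_alt (A : List Int) : Int × Int × Int × Int :=
  let P := A.foldl (fun P a => P ++ [PySem.List.pyGetD P (-1) 0 + a]) [0]
  (PySem.List.pyRange 0 ((A.length : Int) - 2) 1).foldl
    (fun st i =>
      if PySem.List.pyGetD P (i + 3) 0 - PySem.List.pyGetD P i 0 < st.2.2.2 then
        (i, i + 1, i + 2, PySem.List.pyGetD P (i + 3) 0 - PySem.List.pyGetD P i 0)
      else st)
    (0, 0, 0, 30003)

-- ===== PRECONDITION & SPEC =====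
def Spec_find_3_lowers (A : List Int) (out : Int × Int × Int × Int) : Prop := out = find_3_lowers_alt A
instance (A : List Int) (out : Int × Int × Int × Int) : Decidable (Spec_find_3_lowers A out) := by unfold Spec_find_3_lowers; infer_instance

-- ===== CLAIM (what is proved, stated in full; the proofs are below) =====
def Claim_equal_find_3_lowers : Prop := ∀ (A : List Int), Dom_find_3_lowers A → Spec_find_3_lowers A (find_3_lowers A)

-- ===== LEMMAS AND PROOFS =====

-- the zip of the three ranges is the list of consecutive triples (i, i+1, i+2)
theorem pv_zipRanges0 (n : Int) :
    (PySem.List.pyRange 0 n 1).zip ((PySem.List.pyRange 1 n 1).zip (PySem.List.pyRange 2 n 1)) =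
      (PySem.List.pyRange 0 (n - 2) 1).map (fun i => (i, i + 1, i + 2)) := by
  apply List.ext_getElem
  · simp [PySem.List.length_pyRange_one]
    omega
  · intro k h1 h2
    simp [List.getElem_zip, PySem.List.getElem_pyRange_one]
    omega

-- A's loop, on the triple list, is a plain foldl over the start indices: the early return never
-- fires (i + 2 < len A for every start index), and the '= total' branch coincides with 'not <'
theorem pv_aLoop_eq_foldl (A : List Int) : ∀ (l : List Int) (st : Int × Int × Int × Int),
    (∀ i ∈ l, i + 2 ≠ (A.length : Int)) →
    pvALoop A (l.map (fun i => (i, i + 1, i + 2))) st =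
      l.foldl (fun st i =>
        if PySem.List.pyGetD A i 0 + PySem.List.pyGetD A (i + 1) 0 + PySem.List.pyGetD A (i + 2) 0 < st.2.2.2 then
          (i, i + 1, i + 2, PySem.List.pyGetD A i 0 + PySem.List.pyGetD A (i + 1) 0 + PySem.List.pyGetD A (i + 2) 0)
        else st) st := by
  intro l
  induction l with
  | nil => intro st _; rfl
  | cons i rest ih =>
    intro st hmem
    obtain ⟨x, y, z, t⟩ := st
    simp only [List.map_cons, List.foldl_cons, pvALoop]
    rw [if_neg (hmem i (by simp))]
    split_ifs <;>
      first
        | exact ih _ (fun j hj => hmem j (by simp [hj]))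
        | omega

-- the prefix loop produces P0 followed by the running sums continuing from P0's last element
def pvScan (s : Int) : List Int → List Int
  | [] => []
  | a :: A => (s + a) :: pvScan (s + a) A

theorem pv_length_pvScan (s : Int) (A : List Int) : (pvScan s A).length = A.length := by
  induction A generalizing s with
  | nil => rfl
  | cons a A ih => simp [pvScan, ih]

theorem pv_prefix_eq : ∀ (A : List Int) (P0 : List Int) (h : P0 ≠ []),
    A.foldl (fun P a => P ++ [PySem.List.pyGetD P (-1) 0 + a]) P0 = P0 ++ pvScan (P0.getLast h) A := by
  intro A
  induction A with
  | nil => intro P0 h; simp [pvScan]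
  | cons a A ih =>
    intro P0 h
    simp only [List.foldl_cons]
    rw [PySem.List.pyGetD_neg_one P0 0 h,
        ih (P0 ++ [P0.getLast h + a]) (by simp)]
    have hl : (P0 ++ [P0.getLast h + a]).getLast (by simp) = P0.getLast h + a := by
      rw [List.getLast_append]; simp
    rw [hl]
    simp [pvScan]

theorem pv_pvScan_getElem (A : List Int) : ∀ (s : Int) (j : Nat) (hj : j < A.length),
    (pvScan s A)[j]'(by rw [pv_length_pvScan]; exact hj) = s + (A.take (j + 1)).sum := by
  induction A with
  | nil => intro s j hj; simp at hj
  | cons a A ih =>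
    intro s j hj
    cases j with
    | zero => simp [pvScan]
    | succ j =>
      have := ih (s + a) j (by simpa using hj)
      simp only [pvScan, List.getElem_cons_succ, List.take_succ_cons, List.sum_cons]
      rw [this]; ring

-- each entry of the prefix table is a partial sum
theorem pv_prefix_get? (A : List Int) (j : Nat) (hj : j < A.length + 1) :
    (A.foldl (fun P a => P ++ [PySem.List.pyGetD P (-1) 0 + a]) [0])[j]? = some ((A.take j).sum) := by
  rw [pv_prefix_eq A [0] (by simp)]
  simp only [List.getLast_singleton, List.singleton_append]
  cases j with
  | zero => simp
  | succ j =>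
    have hjA : j < A.length := by omega
    have := pv_pvScan_getElem A 0 j hjA
    simp only [List.getElem?_cons_succ]
    rw [List.getElem?_eq_getElem (by rw [pv_length_pvScan]; exact hjA), this]
    simp

-- ===== VERDICT (by name: the statement is the Claim_ definition above) =====
theorem find_3_lowers_spec : Claim_equal_find_3_lowers := by
  intro A _
  unfold Spec_find_3_lowers find_3_lowers find_3_lowers_alt
  set P := A.foldl (fun P a => P ++ [PySem.List.pyGetD P (-1) 0 + a]) [0] with hP
  have hPlen : P.length = A.length + 1 := by
    rw [hP, pv_prefix_eq A [0] (by simp)]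
    simp [pv_length_pvScan]
  have hPget : ∀ (j : Nat), j < A.length + 1 → P[j]? = some ((A.take j).sum) := by
    intro j hj; rw [hP]; exact pv_prefix_get? A j hj
  simp only []
  rw [pv_zipRanges0 (A.length : Int), List.map_map]
  have hcomp : ((fun (p : Int × Int × Int) => (p.1, p.2.1, p.2.2)) ∘ fun i => (i, i + 1, i + 2)) =
      (fun (i : Int) => (i, i + 1, i + 2)) := rfl
  rw [hcomp,
      pv_aLoop_eq_foldl A _ _ (by
        intro i hi
        rw [PySem.List.mem_pyRange_one] at hi
        omega)]
  apply PySem.List.foldl_congr_mem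
  intro st i hi
  rw [PySem.List.mem_pyRange_one] at hi
  have key : PySem.List.pyGetD P (i + 3) 0 - PySem.List.pyGetD P i 0 =
      PySem.List.pyGetD A i 0 + PySem.List.pyGetD A (i + 1) 0 + PySem.List.pyGetD A (i + 2) 0 := by
    have h0 : 0 ≤ i := hi.1
    have h2 : i + 2 < (A.length : Int) := by omega
    set t := i.toNat with ht
    have htA : t + 2 < A.length := by omega
    have gP : ∀ (j : Nat) (hj : j < A.length + 1),
        P[j]'(by rw [hPlen]; omega) = (A.take j).sum := by
      intro j hj
      have h := hPget j hj
      rw [List.getElem?_eq_getElem (by rw [hPlen]; omega)] at h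
      exact Option.some.inj h
    rw [PySem.List.pyGetD_eq_getElem P 0 (by omega) (by rw [hPlen]; omega),
        PySem.List.pyGetD_eq_getElem P 0 (by omega) (by rw [hPlen]; omega),
        PySem.List.pyGetD_eq_getElem A 0 (by omega) (by omega),
        PySem.List.pyGetD_eq_getElem A 0 (by omega) (by omega),
        PySem.List.pyGetD_eq_getElem A 0 (by omega) (by omega)]
    have e3 : (i + 3).toNat = t + 3 := by omega
    have e1 : (i + 1).toNat = t + 1 := by omega
    have e2 : (i + 2).toNat = t + 2 := by omega
    simp only [e3, e1, e2, ← ht]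
    rw [gP (t + 3) (by omega), gP t (by omega)]
    rw [List.sum_take_succ A (t + 2) htA, List.sum_take_succ A (t + 1) (by omega),
        List.sum_take_succ A t (by omega)]
    ring
  rw [key]
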